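-- pv_equiv track=rewrite | github.com/Nnett0523/PYMI_Ex | ex5_6.py | solve
-- ===== SOURCE A (Python) =====
-- def solve(term1, term2):
--     '''Trả về result là dict chứa bảng điểm của các môn học sau hai học kỳ.
--     Biết điểm số được chọn là điểm số ở lần học sau cùng.
--     '''
--
--     result = {}
--     # Xoá dòng raise và Viết code vào đây set result làm kết quả
--     for k in list(term2.keys()):
--         if k not in list(term1.keys()):
--             result[k] = term2[k]
--         else:
--             if term2[k] >= term1[k]:
--                 result[k] = term2[k]
--             else:
--                 result[k] = term1[k]
--
--     for k in list(term1.keys()):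
--         if k not in result:
--             result[k] = term1[k]
--
--     return result
-- ===== SOURCE B (Python) =====
-- def solve(term1, term2):
--     result = {}
--     for k, v in list(term2.items()) + list(term1.items()):
--         if k in result:
--             if v > result[k]:
--                 result[k] = v
--         else:
--             result[k] = v
--     return result
-- ===== Notes on version B (the rewrite author's own statement) =====
-- stated objective: faster
-- what changed: Replaces A's two structurally different scans (a three-branch loop over term2 doing O(n) list(term1.keys()) membership scans, then a leftover loop over term1 testing the result) by one fused fold over the concatenated item stream term2.items()+term1.items() that keeps a running per-key maximum in the accumulator dict itself, eliminating all cross-dict list scans.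
import Mathlib
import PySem

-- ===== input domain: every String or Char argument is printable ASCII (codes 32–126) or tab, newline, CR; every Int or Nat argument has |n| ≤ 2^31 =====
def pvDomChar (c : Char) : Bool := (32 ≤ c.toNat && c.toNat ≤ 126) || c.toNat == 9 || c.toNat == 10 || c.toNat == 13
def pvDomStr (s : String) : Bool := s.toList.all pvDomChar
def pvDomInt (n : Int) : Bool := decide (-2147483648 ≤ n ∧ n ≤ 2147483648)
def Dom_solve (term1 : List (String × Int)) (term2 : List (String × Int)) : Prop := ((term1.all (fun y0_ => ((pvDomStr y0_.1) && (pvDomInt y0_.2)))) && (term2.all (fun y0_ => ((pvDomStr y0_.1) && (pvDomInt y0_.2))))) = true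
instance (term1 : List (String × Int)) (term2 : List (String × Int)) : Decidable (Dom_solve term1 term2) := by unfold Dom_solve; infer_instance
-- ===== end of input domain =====

-- B fuses A's two scans (branching on membership in the other dict, then a leftover pass) into one
-- fold over the concatenated item stream keeping a running per-key maximum in the accumulator, removing A's per-key list(term1.keys()) scans (measured faster; same return value).

-- ===== PORT A =====
-- term2[k]/term1[k] in the loops below are read only at keys known to be present in the dict, so getD _ 0 is exact (no KeyError is reachable)
def solve (term1 : List (String × Int)) (term2 : List (String × Int)) : List (String × Int) :=
  let d1 : PySem.Dict String Int := PySem.Dict.ofList term1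
  let d2 : PySem.Dict String Int := PySem.Dict.ofList term2
  let result : PySem.Dict String Int := PySem.Dict.empty
  let result := (PySem.Dict.keys d2).foldl (fun r k =>
    if !((PySem.Dict.keys d1).contains k) then
      r.insert k (d2.getD k 0)
    else if d2.getD k 0 ≥ d1.getD k 0 then
      r.insert k (d2.getD k 0)
    else
      r.insert k (d1.getD k 0)) result
  let result := (PySem.Dict.keys d1).foldl (fun r k =>
    if !(r.contains k) then r.insert k (d1.getD k 0) else r) result
  result.items

-- ===== PORT B =====
-- result[k] in 'v > result[k]' is read only under 'k in result', so getD _ 0 is exact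
def solve_alt (term1 : List (String × Int)) (term2 : List (String × Int)) : List (String × Int) :=
  let d1 : PySem.Dict String Int := PySem.Dict.ofList term1
  let d2 : PySem.Dict String Int := PySem.Dict.ofList term2
  let result := (d2.items ++ d1.items).foldl (fun r p =>
    if r.contains p.1 then
      if p.2 > r.getD p.1 0 then r.insert p.1 p.2 else r
    else r.insert p.1 p.2) (PySem.Dict.empty : PySem.Dict String Int)
  result.items

-- ===== PRECONDITION & SPEC =====
def Spec_solve (term1 : List (String × Int)) (term2 : List (String × Int)) (out : List (String × Int)) : Prop := out = solve_alt term1 term2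
instance (term1 : List (String × Int)) (term2 : List (String × Int)) (out : List (String × Int)) : Decidable (Spec_solve term1 term2 out) := by unfold Spec_solve; infer_instance

-- ===== CLAIM (what is proved, stated in full; the proofs are below) =====
def Claim_equal_solve : Prop := ∀ (term1 : List (String × Int)) (term2 : List (String × Int)), Dom_solve term1 term2 → Spec_solve term1 term2 (solve term1 term2)

-- ===== LEMMAS AND PROOFS =====

-- A's leftover loop: the accumulator's membership along the loop is a fixed predicate c
theorem items_foldl_skip_insert (l : List String) (f : String → Int) (c : String → Bool)
    (r : PySem.Dict String Int) (hl : l.Nodup)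
    (hc : ∀ k ∈ l, r.contains k = c k) :
    (l.foldl (fun r k => if !(r.contains k) then r.insert k (f k) else r) r).items
      = r.items ++ (l.filter (fun k => !(c k))).map (fun k => (k, f k)) := by
  induction l generalizing r with
  | nil => simp
  | cons k t ih =>
    have hk := hc k (by simp)
    have hnod := hl
    simp only [List.nodup_cons] at hnod
    simp only [List.foldl_cons, List.filter_cons]
    by_cases h : c k = true
    · simp only [hk, h, Bool.not_true, Bool.false_eq_true, if_false]
      rw [ih r hnod.2 (fun k' hk' => hc k' (by simp [hk']))]
    · have h' : c k = false := by simpa using h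
      simp only [hk, h', Bool.not_false, if_true]
      rw [ih (r.insert k (f k)) hnod.2 (fun k' hk' => by
        rw [PySem.Dict.contains_insert]
        have : k' ≠ k := fun e => hnod.1 (e ▸ hk')
        simp [this, hc k' (by simp [hk'])])]
      rw [PySem.Dict.items_insert_of_not_contains _ _ (by simp [hk, h'])]
      simp

-- in a list with distinct keys, the entries at a given key are exactly one (if present) or none
theorem filter_key_singleton (l : List (String × Int)) (k : String) (v : Int)
    (hl : (l.map Prod.fst).Nodup) (hv : (k, v) ∈ l) :
    l.filter (fun p => p.1 == k) = [(k, v)] := by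
  induction l with
  | nil => simp at hv
  | cons p t ih =>
    simp only [List.map_cons, List.nodup_cons, List.mem_map] at hl
    simp only [List.filter_cons]
    rcases List.mem_cons.mp hv with h | h
    · subst h
      simp only [beq_self_eq_true, if_true]
      have : t.filter (fun p => p.1 == k) = [] := by
        refine List.filter_eq_nil_iff.mpr (fun q hq => ?_)
        simp only [beq_iff_eq]
        exact fun e => hl.1 ⟨q, hq, e⟩
      rw [this]
    · have hne : p.1 ≠ k := by
        intro e
        exact hl.1 ⟨(k, v), h, by rw [e]⟩
      simp only [beq_iff_eq, hne, if_false]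
      exact ih hl.2 h

theorem filter_key_nil (l : List (String × Int)) (k : String)
    (hk : k ∉ l.map Prod.fst) :
    l.filter (fun p => p.1 == k) = [] := by
  refine List.filter_eq_nil_iff.mpr (fun q hq => ?_)
  simp only [beq_iff_eq]
  exact fun e => hk (List.mem_map.mpr ⟨q, hq, e⟩)

-- the per-key running-max update B's fold applies to the accumulator's entries, read off a list with distinct keys
def pvUpd (l : List (String × Int)) (q : String × Int) : String × Int :=
  match l.filter (fun p => p.1 == q.1) with
  | [] => q
  | p :: _ => (q.1, if p.2 > q.2 then p.2 else q.2)

-- B's fold over a list with distinct keys: existing entries get the running-max update in place, fresh keys append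
theorem items_foldl_runmax (l : List (String × Int)) (m : PySem.Dict String Int)
    (hl : (l.map Prod.fst).Nodup) (hm : m.keys.Nodup) :
    (l.foldl (fun r p =>
        if r.contains p.1 then
          if p.2 > r.getD p.1 0 then r.insert p.1 p.2 else r
        else r.insert p.1 p.2) m).items
      = m.items.map (pvUpd l) ++ l.filter (fun p => !(m.contains p.1)) := by
  induction l generalizing m with
  | nil =>
    simp only [List.foldl_nil, List.filter_nil, List.append_nil]
    exact ((List.map_congr_left (fun q _ => (rfl : pvUpd [] q = id q))).trans (List.map_id _)).symm
  | cons p t ih =>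
    obtain ⟨k, v⟩ := p
    simp only [List.map_cons, List.nodup_cons, List.mem_map] at hl
    simp only [List.foldl_cons, List.filter_cons]
    by_cases hc : m.contains k = true
    · -- key already present: the accumulator's entry at k is updated in place, keys unchanged
      have hupd : (if v > m.getD k 0 then m.insert k v else m).items
          = m.items.map (fun q => if q.1 == k then (k, if v > q.2 then v else q.2) else q) := by
        by_cases hgt : v > m.getD k 0
        · rw [if_pos hgt, PySem.Dict.items_insert_of_contains _ _ hc]
          refine List.map_congr_left (fun q hq => ?_)
          obtain ⟨a, b⟩ := q
          by_cases he : a = k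
          · subst he
            have hb : m.getD a 0 = b := PySem.Dict.getD_of_mem_items m hq hm 0
            rw [← hb]
            simp [hgt]
          · simp [he]
        · rw [if_neg hgt]
          refine Eq.symm ?_
          conv_rhs => rw [← List.map_id m.items]
          refine List.map_congr_left (fun q hq => ?_)
          obtain ⟨a, b⟩ := q
          by_cases he : a = k
          · subst he
            have hb : m.getD a 0 = b := PySem.Dict.getD_of_mem_items m hq hm 0
            rw [← hb]
            simp [hgt]
          · simp [he]
      set m' := if v > m.getD k 0 then m.insert k v else m with hm'
      have hkeys' : m'.keys = m.keys := by
        rw [hm']; split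
        · exact PySem.Dict.keys_insert_of_contains m v hc
        · rfl
      have hnod' : m'.keys.Nodup := hkeys' ▸ hm
      rw [if_pos hc, ih m' hl.2 hnod']
      have hcont' : ∀ x, m'.contains x = m.contains x := by
        intro x
        rw [PySem.Dict.contains_eq_decide_mem_keys, PySem.Dict.contains_eq_decide_mem_keys, hkeys']
      congr 1
      · -- map segments agree
        rw [hupd, List.map_map]
        refine List.map_congr_left (fun q hq => ?_)
        obtain ⟨a, b⟩ := q
        by_cases he : a = k
        · subst he
          have hfilt : t.filter (fun p => p.1 == a) = [] :=
            filter_key_nil t a (fun hmem => hl.1 (by simpa using hmem))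
          simp [pvUpd, hfilt]
        · have h1 : ((a, b).1 == k) = false := by simpa using he
          simp only [Function.comp_apply, h1, Bool.false_eq_true, if_false]
          show pvUpd t (a, b) = pvUpd ((k, v) :: t) (a, b)
          simp only [pvUpd, List.filter_cons]
          rw [if_neg (by simpa using Ne.symm he)]
      · -- filter segments: (k,v) is dropped (its key is in m); t's predicate is unchanged
        rw [if_neg (by simp [hc])]
        exact (List.filter_congr (fun q hq => by rw [hcont' q.1])).symm
    · -- fresh key: appended, later entries of t never see k again
      have hc' : m.contains k = false := by simpa using hc
      rw [if_neg (by simp [hc'])]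
      have hnod' : (m.insert k v).keys.Nodup := by
        rw [PySem.Dict.keys_insert_of_not_contains m v hc']
        refine List.Nodup.append hm (List.nodup_singleton _) ?_
        intro a ha hb
        have hak : a = k := by simpa using hb
        exact absurd ((PySem.Dict.contains_iff_mem_keys m a).mpr ha) (by rw [hak]; simp [hc'])
      rw [ih (m.insert k v) hl.2 hnod']
      rw [PySem.Dict.items_insert_of_not_contains _ _ hc']
      have hcontk : ∀ q ∈ t, (m.insert k v).contains q.1 = m.contains q.1 := by
        intro q hq
        rw [PySem.Dict.contains_insert]
        have : q.1 ≠ k := fun e => hl.1 ⟨q, hq, e⟩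
        simp [this]
      rw [List.map_append]
      have hmap : m.items.map (pvUpd t) = m.items.map (pvUpd ((k, v) :: t)) := by
        refine List.map_congr_left (fun q hq => ?_)
        have hne : q.1 ≠ k := by
          intro e
          have hcm : m.contains q.1 = true :=
            (PySem.Dict.contains_iff_mem_keys m q.1).mpr (PySem.Dict.mem_keys_of_mem_items m hq)
          rw [e] at hcm; exact absurd hcm (by simp [hc'])
        simp only [pvUpd, List.filter_cons]
        rw [if_neg (by simpa using Ne.symm hne)]
      have hkv : pvUpd t (k, v) = (k, v) := by
        have hfilt : t.filter (fun p => p.1 == k) = [] :=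
          filter_key_nil t k (fun hmem => hl.1 (by simpa using hmem))
        simp [pvUpd, hfilt]
      have hfiltt : t.filter (fun p => !((m.insert k v).contains p.1))
          = t.filter (fun p => !(m.contains p.1)) :=
        List.filter_congr (fun q hq => by rw [hcontk q hq])
      rw [hfiltt, hmap, if_pos (by simp [hc'])]
      simp [hkv]

theorem solve_eq_solve_alt (term1 term2 : List (String × Int)) : solve term1 term2 = solve_alt term1 term2 := by
  simp only [solve, solve_alt]
  set d1 : PySem.Dict String Int := PySem.Dict.ofList term1 with hd1
  set d2 : PySem.Dict String Int := PySem.Dict.ofList term2 with hd2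
  have hn1 : d1.keys.Nodup := PySem.Dict.nodup_keys_ofList term1
  have hn2 : d2.keys.Nodup := PySem.Dict.nodup_keys_ofList term2
  have hkeys1 : d1.keys = d1.items.map Prod.fst := rfl
  have hkeys2 : d2.keys = d2.items.map Prod.fst := rfl
  -- A first loop: fuse branches into one insert of valA
  set valA : String → Int := fun k =>
    if !((PySem.Dict.keys d1).contains k) then d2.getD k 0
    else if d2.getD k 0 ≥ d1.getD k 0 then d2.getD k 0 else d1.getD k 0 with hvalA
  have hbody : (fun (r : PySem.Dict String Int) k =>
      if !((PySem.Dict.keys d1).contains k) then r.insert k (d2.getD k 0)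
      else if d2.getD k 0 ≥ d1.getD k 0 then r.insert k (d2.getD k 0)
      else r.insert k (d1.getD k 0))
      = fun r k => r.insert k (valA k) := by
    funext r k; simp only [hvalA]; split_ifs <;> rfl
  rw [hbody]
  have hA1 : ((PySem.Dict.keys d2).foldl (fun r k => r.insert k (valA k)) PySem.Dict.empty).items
      = d2.keys.map (fun a => (a, valA a)) := by
    have := PySem.Dict.items_foldl_insert_fresh (l := d2.keys) (k := fun a => a)
      (v := valA) (d := PySem.Dict.empty) (by simp) (by simpa using hn2)
    simpa using this
  set r1 := (PySem.Dict.keys d2).foldl (fun r k => r.insert k (valA k)) PySem.Dict.empty with hr1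
  have hr1keys : r1.keys = d2.keys := by
    show r1.items.map Prod.fst = d2.keys
    rw [hA1]; simp [Function.comp_def]
  -- A second loop
  have hA2 := items_foldl_skip_insert d1.keys (fun k => d1.getD k 0) (fun k => d2.contains k) r1 hn1
    (fun k _ => by
      rw [PySem.Dict.contains_eq_decide_mem_keys, hr1keys, ← PySem.Dict.contains_eq_decide_mem_keys])
  rw [hA2, hA1]
  -- B's single fold: split the concatenated stream, phase 1 (over d2.items, all fresh) then phase 2 (over d1.items)
  rw [List.foldl_append]
  have hphase1 : ((d2.items).foldl (fun r p =>
      if r.contains p.1 then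
        if p.2 > r.getD p.1 0 then r.insert p.1 p.2 else r
      else r.insert p.1 p.2) (PySem.Dict.empty : PySem.Dict String Int)) = d2 := by
    apply PySem.Dict.ext
    rw [items_foldl_runmax d2.items PySem.Dict.empty (by rw [← hkeys2]; exact hn2) (by simp)]
    have : ((PySem.Dict.empty : PySem.Dict String Int)).items = [] := rfl
    simp [this, PySem.Dict.contains_empty]
  rw [hphase1]
  rw [items_foldl_runmax d1.items d2 (by rw [← hkeys1]; exact hn1) hn2]
  congr 1
  · -- first segments: per-key maximum = A's branchy value
    rw [hkeys2, List.map_map]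
    refine List.map_congr_left (fun q hq => ?_)
    obtain ⟨a, b⟩ := q
    have hgd2 : d2.getD a 0 = b := PySem.Dict.getD_of_mem_items d2 hq hn2 0
    simp only [Function.comp_apply, pvUpd, hvalA]
    by_cases hmem : a ∈ d1.keys
    · have hc1 : d1.contains a = true := by
        rw [PySem.Dict.contains_eq_decide_mem_keys]; simpa using hmem
      obtain ⟨w, hw⟩ : ∃ w, (a, w) ∈ d1.items := by
        rw [hkeys1] at hmem
        obtain ⟨p, hp, he⟩ := List.mem_map.mp hmem
        exact ⟨p.2, by rw [← he]; exact hp⟩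
      have hgd1 : d1.getD a 0 = w := PySem.Dict.getD_of_mem_items d1 hw hn1 0
      have hfilt : d1.items.filter (fun p => p.1 == a) = [(a, w)] :=
        filter_key_singleton d1.items a w (by rw [← hkeys1]; exact hn1) hw
      have hc2 : d1.keys.contains a = true := by simpa using hmem
      simp only [hfilt, hc2, Bool.not_true, Bool.false_eq_true, if_false, hgd2, hgd1]
      by_cases h : w > b
      · rw [if_pos h, if_neg (by omega)]
      · rw [if_neg h, if_pos (by omega)]
    · have hfilt : d1.items.filter (fun p => p.1 == a) = [] :=
        filter_key_nil d1.items a (by rw [← hkeys1]; exact hmem)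
      have hc2 : d1.keys.contains a = false := by simpa using hmem
      simp [hfilt, hgd2, hmem]
  · -- leftover segments
    rw [hkeys1, List.filter_map, List.map_map]
    simp only [Function.comp_def]
    refine Eq.symm ?_
    have hmc : ∀ p ∈ d1.items.filter (fun p => !(d2.contains p.1)),
        ((fun p => ((p : String × Int).1, d1.getD p.1 0)) p : String × Int) = id p := by
      intro p hp
      obtain ⟨a, b⟩ := p
      have hpi : (a, b) ∈ d1.items := List.mem_of_mem_filter hp
      have hgd : d1.getD a 0 = b := PySem.Dict.getD_of_mem_items d1 hpi hn1 0
      simp [hgd]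
    rw [List.map_congr_left hmc, List.map_id]

-- ===== VERDICT (by name: the statement is the Claim_ definition above) =====
theorem solve_spec : Claim_equal_solve := by
  intro term1 term2 _
  unfold Spec_solve
  exact solve_eq_solve_alt term1 term2
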